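-- pv_equiv track=rewrite | github.com/AlbertoJoseF/LIPO | utils.py | get_lowest_values
-- ===== SOURCE A (Python) =====
-- def get_lowest_values(a_list: list, amount: int):
--     if not (isinstance(amount, int) or isinstance(amount, float)) or ((amount - round(amount)) != 0) or (amount < 0):
--         raise TypeError("Provided 'amount' argument is not a numeric positive whole number. Argument provided is of type: {} and of value: {}.".format(type(amount), amount))
--     result = list()
--     for item in a_list:
--         if len(result) == amount:
--             temp = item
--             for result_item in result:
--                 if temp < result_item:
--                     temp = result_item
--             if temp != item:
--                 result.remove(temp)
--                 result.append(item)
--         else: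
--             result.append(item)
--     return result
-- ===== SOURCE B (Python) =====
-- import bisect
-- def get_lowest_values(a_list, amount):
--     if not (isinstance(amount, int) or isinstance(amount, float)) or ((amount - round(amount)) != 0) or (amount < 0):
--         raise TypeError("Provided 'amount' argument is not a numeric positive whole number. Argument provided is of type: {} and of value: {}.".format(type(amount), amount))
--     cur = []  # sorted ascending by (value, -index); cur[-1] = current max, earliest-entered among equals
--     for i, item in enumerate(a_list):
--         if len(cur) < amount:
--             bisect.insort(cur, (item, -i))
--         elif cur and item < cur[-1][0]:
--             cur.pop()
--             bisect.insort(cur, (item, -i))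
--     return [v for v, ni in sorted(cur, key=lambda p: -p[1])]
-- ===== Notes on version B (the rewrite author's own statement) =====
-- stated objective: faster
-- what changed: B keeps the running window as a list of (value, -entry_index) pairs kept sorted ascending, so the current maximum (and, among equal maxima, the first-entered one) sits at the end and is popped in O(1), with binary insertion replacing A's full max-scan plus list.remove per element; survivors are emitted in entry order at the end.
import Mathlib
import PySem

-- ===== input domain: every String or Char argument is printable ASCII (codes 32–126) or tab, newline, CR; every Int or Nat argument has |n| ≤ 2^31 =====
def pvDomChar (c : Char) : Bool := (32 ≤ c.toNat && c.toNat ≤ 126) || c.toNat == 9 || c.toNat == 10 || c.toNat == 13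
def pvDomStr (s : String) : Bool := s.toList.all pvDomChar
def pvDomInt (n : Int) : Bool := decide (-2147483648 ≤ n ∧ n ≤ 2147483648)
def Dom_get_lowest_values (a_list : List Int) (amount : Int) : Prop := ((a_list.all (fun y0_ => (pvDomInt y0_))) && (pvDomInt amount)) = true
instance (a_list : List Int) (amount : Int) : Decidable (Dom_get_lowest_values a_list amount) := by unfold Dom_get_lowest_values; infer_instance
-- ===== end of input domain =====

-- B keeps the window as a list of (value, -entry_index) pairs kept sorted ascending, popping the
-- current maximum off the end and binary-inserting newcomers instead of A's per-item max-scan plus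
-- list.remove, and emits the survivors in entry order at the end (objective: faster).

-- ===== PORT A =====
-- A's for-loop over a_list carrying `result`; the inner for-loop computing `temp` is the foldl.
def glvLoopA (amount : Int) (result : List Int) : List Int → List Int
  | [] => result
  | item :: rest =>
    glvLoopA amount
      (if (result.length : Int) = amount then
        let temp := result.foldl (fun t r => if t < r then r else t) item
        if temp ≠ item then
          ((PySem.List.remove? result temp).getD result) ++ [item]
        else result
      else result ++ [item]) rest

def get_lowest_values (a_list : List Int) (amount : Int) : List Int :=
  glvLoopA amount [] a_list

-- ===== PORT B =====
-- bisect.insort on the (value, -index) tuples = ordered insertion under Python's lexicographic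
-- tuple order (exact here: the second components are pairwise distinct, so placement among
-- equal keys never arises).
def glvInsort : List (Int × Int) → (Int × Int) → List (Int × Int)
  | [], x => [x]
  | y :: t, x =>
    if x.1 < y.1 ∨ (x.1 = y.1 ∧ x.2 < y.2) then x :: y :: t else y :: glvInsort t x

-- Source B's `for i, item in enumerate(a_list)` loop carrying `cur` and the running index i;
-- `cur ≠ [] ∧ item < (cur.getLast?.getD (0, 0)).1` renders `cur and item < cur[-1][0]`
-- (the getD default is never read), and `cur.dropLast` is `cur.pop()`.
def glvLoopB (amount : Int) (cur : List (Int × Int)) (i : Int) : List Int → List (Int × Int)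
  | [] => cur
  | item :: rest =>
    glvLoopB amount
      (if (cur.length : Int) < amount then glvInsort cur (item, -i)
       else if cur ≠ [] ∧ item < (cur.getLast?.getD (0, 0)).1 then
         glvInsort cur.dropLast (item, -i)
       else cur) (i + 1) rest

def get_lowest_values_alt (a_list : List Int) (amount : Int) : List Int :=
  (PySem.List.sorted (glvLoopB amount [] 0 a_list) (fun p => -p.2) false).map Prod.fst

-- ===== PRECONDITION & SPEC =====
-- Pre_ excludes exactly amount < 0, where the Python A raises TypeError (B raises it too).
def Pre_get_lowest_values (a_list : List Int) (amount : Int) : Prop := 0 ≤ amount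
instance (a_list : List Int) (amount : Int) : Decidable (Pre_get_lowest_values a_list amount) := by unfold Pre_get_lowest_values; infer_instance
def pvWitness_get_lowest_values : List Int × Int := ([5, 5, 3, 7, 1], 2)

def Spec_get_lowest_values (a_list : List Int) (amount : Int) (out : List Int) : Prop := out = get_lowest_values_alt a_list amount
instance (a_list : List Int) (amount : Int) (out : List Int) : Decidable (Spec_get_lowest_values a_list amount out) := by unfold Spec_get_lowest_values; infer_instance

-- ===== CLAIM (what is proved, stated in full; the proofs are below) =====
def Claim_equal_get_lowest_values : Prop := ∀ (a_list : List Int) (amount : Int), Dom_get_lowest_values a_list amount → Pre_get_lowest_values a_list amount → Spec_get_lowest_values a_list amount (get_lowest_values a_list amount)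

-- ===== LEMMAS AND PROOFS =====

def lexLt (a b : Int × Int) : Prop := a.1 < b.1 ∨ (a.1 = b.1 ∧ a.2 < b.2)

theorem glvInsort_perm (C : List (Int × Int)) (x : Int × Int) : (glvInsort C x).Perm (x :: C) := by
  induction C with
  | nil => simp [glvInsort]
  | cons y t ih =>
    simp only [glvInsort]
    split
    · exact List.Perm.refl _
    · exact (List.Perm.cons y ih).trans (List.Perm.swap x y t)

theorem lexLt_trans {a b c : Int × Int} (h1 : lexLt a b) (h2 : lexLt b c) : lexLt a c := by
  unfold lexLt at *; omega

theorem glvInsort_pairwise (C : List (Int × Int)) (x : Int × Int)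
    (hC : C.Pairwise lexLt) (hx : ∀ y ∈ C, x.2 ≠ y.2) :
    (glvInsort C x).Pairwise lexLt := by
  induction C with
  | nil => simp [glvInsort, lexLt]
  | cons y t ih =>
    simp only [glvInsort]
    rcases List.pairwise_cons.mp hC with ⟨hyt, htp⟩
    split
    · rename_i h
      refine List.pairwise_cons.mpr ⟨?_, hC⟩
      intro z hz
      rcases List.mem_cons.mp hz with rfl | hz
      · exact h
      · exact lexLt_trans h (hyt z hz)
    · rename_i h
      refine List.pairwise_cons.mpr ⟨?_, ih htp (fun z hz => hx z (by simp [hz]))⟩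
      intro z hz
      rcases List.mem_cons.mp ((glvInsort_perm t x).mem_iff.mp hz) with rfl | hz'
      · have := hx y (by simp)
        unfold lexLt at *; omega
      · exact hyt z hz'

theorem foldl_if_max (l : List Int) (a : Int) :
    l.foldl (fun t r => if t < r then r else t) a = l.foldl max a := by
  have : (fun (t r : Int) => if t < r then r else t) = max := by
    funext t r; rcases lt_trichotomy t r with h | h | h <;> simp [max_def] <;> omega
  rw [this]

theorem foldl_max_le (l : List Int) (a : Int) (h : ∀ x ∈ l, x ≤ a) : l.foldl max a = a := by
  induction l with
  | nil => rfl
  | cons y t ih =>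
    simp only [List.foldl_cons]
    have : max a y = a := by have := h y (by simp); omega
    rw [this]; exact ih (fun x hx => h x (by simp [hx]))

theorem foldl_max_eq (l : List Int) (a v : Int) (hv : v ∈ l) (h : ∀ x ∈ l, x ≤ v) :
    l.foldl max a = max a v := by
  induction l generalizing a with
  | nil => simp at hv
  | cons y t ih =>
    simp only [List.foldl_cons]
    rcases List.mem_cons.mp hv with rfl | hvt
    · by_cases hvt' : v ∈ t
      · rw [ih _ hvt' (fun x hx => h x (List.mem_cons_of_mem _ hx))]; omega
      ·  have hle : ∀ x ∈ t, x ≤ max a v := fun x hx => le_trans (h x (List.mem_cons_of_mem _ hx)) (by omega)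
         rw [foldl_max_le t _ hle]
    · rw [ih _ hvt (fun x hx => h x (List.mem_cons_of_mem _ hx))]
      have := h y (by simp); omega

theorem glv_main (items : List Int) : ∀ (C P : List (Int × Int)) (i amount : Int),
    C.Perm P → C.Pairwise lexLt → P.Pairwise (fun a b => b.2 < a.2) →
    (∀ p ∈ C, -i < p.2) → (C.length : Int) ≤ amount →
    glvLoopA amount (P.map Prod.fst) items
      = (PySem.List.sorted (glvLoopB amount C i items) (fun p => -p.2) false).map Prod.fst := by
  induction items with
  | nil =>
    intro C P i amount hCP hC hP hIdx hLen
    simp only [glvLoopA, glvLoopB]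
    have hP' : P.Pairwise (fun a b : Int × Int => -a.2 < -b.2) := hP.imp (fun h => by omega)
    rw [PySem.List.sorted_eq_of_perm_of_pairwise_lt C P (fun p => -p.2) hCP.symm hP']
  | cons item rest ih =>
    intro C P i amount hCP hC hP hIdx hLen
    have hlen : P.length = C.length := hCP.symm.length_eq
    simp only [glvLoopA, glvLoopB]
    by_cases hfull : (C.length : Int) < amount
    · -- fill phase
      rw [if_neg (by simp only [List.length_map]; omega), if_pos hfull]
      have hx2 : ∀ p ∈ C, -(i : Int) ≠ p.2 := fun p hp => by have := hIdx p hp; omega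
      have hmp : (P.map Prod.fst) ++ [item] = (P ++ [(item, -i)]).map Prod.fst := by simp
      rw [hmp]
      refine ih (glvInsort C (item, -i)) (P ++ [(item, -i)]) (i + 1) amount
        (((glvInsort_perm C _).trans (hCP.cons _)).trans (List.perm_append_singleton _ P).symm)
        (glvInsort_pairwise C _ hC hx2)
        (List.pairwise_append.mpr ⟨hP, List.pairwise_singleton _ _,
          fun a ha b hb => by
            simp only [List.mem_singleton] at hb; subst hb
            have := hIdx a (hCP.mem_iff.mpr ha); simpa using this⟩)
        (fun p hp => by
          rcases List.mem_cons.mp ((glvInsort_perm C _).mem_iff.mp hp) with rfl | hp'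
          · show -(i+1) < -i; omega
          · have := hIdx p hp'; omega)
        (by have := (glvInsort_perm C (item, -i)).length_eq; simp at this; omega)
    · -- window full : C.length = amount
      have hCeq : (C.length : Int) = amount := by omega
      rw [if_pos (by simp only [List.length_map]; omega), if_neg hfull]
      cases hq : C.getLast? with
      | none =>
        have hCnil : C = [] := List.getLast?_eq_none_iff.mp hq
        subst hCnil
        have hPnil : P = [] := List.perm_nil.mp hCP.symm
        subst hPnil
        rw [if_neg (by simp)]
        simp only [List.map_nil, ne_eq, not_true_eq_false]
        exact ih [] [] (i + 1) amount hCP hC hP (by simp) hLen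
      | some q =>
        have hCdrop : C.dropLast ++ [q] = C :=
          List.dropLast_append_getLast? q (Option.mem_def.mpr hq)
        have hCsplit := List.pairwise_append.mp (hCdrop ▸ hC)
        have hC0 : C.dropLast.Pairwise lexLt := hCsplit.1
        have hAllLex : ∀ p ∈ C.dropLast, lexLt p q := by
          intro p hp; exact hCsplit.2.2 p hp q (by simp)
        have hmemC : ∀ p ∈ C, p = q ∨ lexLt p q := by
          intro p hp
          rcases List.mem_append.mp (show p ∈ C.dropLast ++ [q] by rw [hCdrop]; exact hp) with h | h
          · exact Or.inr (hAllLex p h)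
          · exact Or.inl (by simpa using h)
        have hle : ∀ p ∈ C, p.1 ≤ q.1 := by
          intro p hp
          rcases hmemC p hp with rfl | h
          · exact le_refl _
          · unfold lexLt at h; omega
        have hqP : q ∈ P := hCP.mem_iff.mp (by rw [← hCdrop]; simp)
        have hmax : (P.map Prod.fst).foldl (fun t r => if t < r then r else t) item
            = max item q.1 := by
          rw [foldl_if_max]
          refine foldl_max_eq _ _ _ (List.mem_map.mpr ⟨q, hqP, rfl⟩) ?_
          intro x hx
          rcases List.mem_map.mp hx with ⟨p, hp, rfl⟩
          exact hle p (hCP.mem_iff.mpr hp)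
        have hCne : C ≠ [] := by intro h; rw [h] at hq; simp at hq
        rw [hmax]
        simp only [Option.getD_some]
        by_cases hi : item < q.1
        · have hmaxq : max item q.1 = q.1 := max_eq_right (le_of_lt hi)
          rw [if_pos (show max item q.1 ≠ item by rw [hmaxq]; omega),
            if_pos (⟨hCne, hi⟩ : C ≠ [] ∧ item < q.1), hmaxq]
          obtain ⟨P1, P2, rfl⟩ := List.append_of_mem hqP
          have hPsplit := List.pairwise_append.mp hP
          have hP1fst : ∀ p ∈ P1, p.1 ≠ q.1 := by
            intro p hp
            have hlt : q.2 < p.2 := hPsplit.2.2 p hp q (by simp)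
            have hpC : p ∈ C := hCP.mem_iff.mpr (by simp [hp])
            rcases hmemC p hpC with rfl | h
            · omega
            · unfold lexLt at h; omega
          have hnot : q.1 ∉ P1.map Prod.fst := by
            intro h; rcases List.mem_map.mp h with ⟨p, hp, he⟩; exact hP1fst p hp he
          have hmemR : q.1 ∈ (P1 ++ q :: P2).map Prod.fst := List.mem_map.mpr ⟨q, by simp, rfl⟩
          rw [PySem.List.remove?_eq_some_erase _ _ hmemR, Option.getD_some,
            List.map_append, List.map_cons, List.erase_append_right _ hnot,
            List.erase_cons_head, ← List.map_append]
          have hmp : (P1 ++ P2).map Prod.fst ++ [item]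
              = ((P1 ++ P2) ++ [(item, -i)]).map Prod.fst := by simp
          rw [hmp]
          have hC0P : C.dropLast.Perm (P1 ++ P2) := by
            have h1 : (C.dropLast ++ [q]).Perm ((P1 ++ P2) ++ [q]) := by
              rw [hCdrop]
              refine hCP.trans ?_
              rw [List.append_assoc]
              exact ((List.perm_append_singleton q P2).symm).append_left P1
            exact (List.perm_append_right_iff [q]).mp h1
          have hsubC0 : ∀ p ∈ C.dropLast, p ∈ C := by
            intro p hp; rw [← hCdrop]; exact List.mem_append_left _ hp
          have hsubPP : ∀ p ∈ P1 ++ P2, p ∈ C := by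
            intro p hp
            refine hCP.mem_iff.mpr ?_
            rcases List.mem_append.mp hp with h | h
            · simp [h]
            · simp [h]
          refine ih (glvInsort C.dropLast (item, -i)) ((P1 ++ P2) ++ [(item, -i)]) (i + 1) amount
            (((glvInsort_perm _ _).trans (hC0P.cons _)).trans
              (List.perm_append_singleton _ _).symm)
            (glvInsort_pairwise _ _ hC0
              (fun y hy => by have := hIdx y (hsubC0 y hy); omega))
            (List.pairwise_append.mpr ⟨hP.sublist ((P2.sublist_cons_self q).append_left P1),
              List.pairwise_singleton _ _,
              fun a ha b hb => by
                simp only [List.mem_singleton] at hb; subst hb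
                have := hIdx a (hsubPP a ha); simpa using this⟩)
            (fun p hp => by
              rcases List.mem_cons.mp ((glvInsort_perm _ _).mem_iff.mp hp) with rfl | hp'
              · show -(i+1) < -i; omega
              · have := hIdx p (hsubC0 p hp'); omega)
            (by
              have h1 := (glvInsort_perm C.dropLast (item, -i)).length_eq
              have h2 : C.dropLast.length + 1 = C.length := by
                conv_rhs => rw [← hCdrop]
                simp
              simp at h1; omega)
        · have hmaxitem : max item q.1 = item := max_eq_left (by omega)
          rw [if_neg (show ¬(max item q.1 ≠ item) by rw [hmaxitem]; simp),
            if_neg (show ¬(C ≠ [] ∧ item < q.1) from fun h => hi h.2)]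
          exact ih C P (i + 1) amount hCP hC hP
            (fun p hp => by have := hIdx p hp; omega) hLen

-- ===== VERDICT (by name: the statement is the Claim_ definition above) =====
theorem get_lowest_values_spec : Claim_equal_get_lowest_values := by
  intro a_list amount _hdom hpre
  unfold Pre_get_lowest_values at hpre
  unfold Spec_get_lowest_values get_lowest_values get_lowest_values_alt
  have h := glv_main a_list [] [] 0 amount (List.Perm.refl _) (by simp) (by simp)
    (by simp) (by simpa using hpre)
  simpa using h
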